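-- pv_equiv track=rewrite | github.com/Lovince27/Lovince-spiral-engine | 27_1.py | blend_digits
-- ===== SOURCE A (Python) =====
-- from typing import List, Optional, Tuple, Union
--
-- def blend_digits(digit_sequences: List[str]) -> str:
--     """
--     Interleave digits from multiple sequences.
--
--     :param digit_sequences: List of digit strings.
--     :return: Blended digit string.
--     """
--     if not digit_sequences or any(not seq for seq in digit_sequences):
--         return ""
--
--     max_length = max(len(seq) for seq in digit_sequences)
--     blended = []
--
--     for i in range(max_length):
--         for seq in digit_sequences:
--             if i < len(seq):
--                 blended.append(seq[i])
--
--     return "".join(blended)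
-- ===== SOURCE B (Python) =====
-- def blend_digits(digit_sequences):
--     """
--     Interleave digits from multiple sequences.
--
--     :param digit_sequences: List of digit strings.
--     :return: Blended digit string.
--     """
--     if not digit_sequences or any(not seq for seq in digit_sequences):
--         return ""
--
--     columns = []
--     rest = digit_sequences
--     while rest:
--         columns.append("".join(s[0] for s in rest))
--         rest = [s[1:] for s in rest if len(s) > 1]
--
--     return "".join(columns)
-- ===== Notes on version B (the rewrite author's own statement) =====
-- stated objective: alternative
-- what changed: Replaced the index-based double loop over range(max_length) with a head-peeling sweep: repeatedly emit the first characters of all still-nonempty sequences and drop them, so no length maximum and no per-index bounds check are needed.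
import Mathlib
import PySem

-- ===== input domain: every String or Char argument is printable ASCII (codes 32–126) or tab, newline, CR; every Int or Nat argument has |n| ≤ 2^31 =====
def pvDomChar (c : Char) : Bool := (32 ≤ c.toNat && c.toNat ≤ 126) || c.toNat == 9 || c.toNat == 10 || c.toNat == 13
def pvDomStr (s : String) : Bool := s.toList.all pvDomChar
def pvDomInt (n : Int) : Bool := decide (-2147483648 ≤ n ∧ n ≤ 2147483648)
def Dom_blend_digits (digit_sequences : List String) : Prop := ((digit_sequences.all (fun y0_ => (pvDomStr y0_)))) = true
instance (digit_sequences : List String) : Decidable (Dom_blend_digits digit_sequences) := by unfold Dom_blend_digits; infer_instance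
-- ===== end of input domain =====

-- B replaces A's range(max_length)-indexed double loop by a head-peeling sweep over the sequences (alternative decomposition, same cost class).
-- Python 1-character strings appended to `blended` are ported as Char; "".join is String.mk.

-- ===== PORT A =====
def blend_digits (digit_sequences : List String) : String :=
  if digit_sequences.isEmpty || digit_sequences.any (fun seq => seq.toList.isEmpty) then "" else
  match PySem.List.max? (digit_sequences.map (fun seq => PySem.Str.len seq)) (fun x => x) with
  | none => ""  -- unreachable totality branch: the guard ensures the list is nonempty, so Python's max does not raise
  | some maxLength =>
    let blended : List Char :=
      (PySem.List.pyRange 0 maxLength 1).foldl (fun acc i =>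
        digit_sequences.foldl (fun acc seq =>
          if i < PySem.Str.len seq then acc ++ [(PySem.Str.pyGet? seq i).getD ' '] else acc) acc) []
    String.ofList blended

-- ===== PORT B =====
-- termination measure fact for the helper blendAuxB below (cited in its termination proof)
theorem pvDropMeasure (l : List (List Char)) :
    (((l.filter (fun s => 1 < s.length)).map (fun s => s.drop 1)).map List.length).sum
      + (l.filter (fun s => 1 < s.length)).length ≤ (l.map List.length).sum := by
  induction l with
  | nil => simp
  | cons a t ih =>
    by_cases ha : 1 < a.length
    · simp only [List.filter_cons, ha, decide_true, if_true, List.map_cons, List.sum_cons,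
        List.length_cons, List.length_drop]
      omega
    · simp only [List.filter_cons, ha, decide_false, Bool.false_eq_true, if_false]
      simp only [List.map_cons, List.sum_cons]
      omega

-- helper for the `while rest:` loop of Source B; `s[0]` is total under the loop invariant (all sequences nonempty), ported with headD
def blendAuxB (rest : List (List Char)) : List Char :=
  if rest.isEmpty then []
  else (rest.map (fun s => s.headD ' ')) ++
       blendAuxB ((rest.filter (fun s => 1 < s.length)).map (fun s => s.drop 1))
termination_by (rest.map List.length).sum + rest.length
decreasing_by
  rename_i h
  rw [List.filter_attach rest (fun s => 1 < s.length)]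
  have hne : rest ≠ [] := by simpa using h
  have h4 : 1 ≤ rest.length := List.length_pos_of_ne_nil hne
  have hm := pvDropMeasure rest
  simp [Function.comp_def] at hm ⊢
  omega

def blend_digits_alt (digit_sequences : List String) : String :=
  if digit_sequences.isEmpty || digit_sequences.any (fun seq => seq.toList.isEmpty) then "" else
  String.ofList (blendAuxB (digit_sequences.map String.toList))

-- ===== PRECONDITION & SPEC =====
def Spec_blend_digits (digit_sequences : List String) (out : String) : Prop := out = blend_digits_alt digit_sequences
instance (digit_sequences : List String) (out : String) : Decidable (Spec_blend_digits digit_sequences out) := by unfold Spec_blend_digits; infer_instance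

-- ===== CLAIM (what is proved, stated in full; the proofs are below) =====
def Claim_equal_blend_digits : Prop := ∀ (digit_sequences : List String), Dom_blend_digits digit_sequences → Spec_blend_digits digit_sequences (blend_digits digit_sequences)

-- ===== LEMMAS AND PROOFS =====

-- column k of a family of character lists: the k-th character of every list that is long enough, in order
def pvCol (k : Nat) (rest : List (List Char)) : List Char :=
  rest.filterMap (fun s => s[k]?)

theorem pvCol_zero (rest : List (List Char)) (h : ∀ s ∈ rest, s ≠ []) :
    pvCol 0 rest = rest.map (fun s => s.headD ' ') := by
  induction rest with
  | nil => rfl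
  | cons a t ih =>
    have ha : a ≠ [] := h a (by simp)
    cases a with
    | nil => exact absurd rfl ha
    | cons c cs =>
      simp [pvCol, List.filterMap_cons] at ih ⊢
      exact ih (fun s hs => h s (by simp [hs]))

theorem pvCol_succ (k : Nat) (rest : List (List Char)) :
    pvCol (k + 1) rest = pvCol k ((rest.filter (fun s => 1 < s.length)).map (fun s => s.drop 1)) := by
  induction rest with
  | nil => rfl
  | cons a t ih =>
    by_cases ha : 1 < a.length
    · simp only [pvCol, List.filterMap_cons, List.filter_cons, ha, decide_true, if_true,
        List.map_cons] at ih ⊢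
      have : a[k+1]? = (a.drop 1)[k]? := by
        rw [List.getElem?_drop, Nat.add_comm]
      rw [this]
      cases hg : (a.drop 1)[k]? <;> simp [hg, ih]
    · have hnone : a[k+1]? = none := by
        apply List.getElem?_eq_none
        omega
      simp only [pvCol, List.filterMap_cons, List.filter_cons, ha, decide_false, if_false,
        hnone] at ih ⊢
      exact ih

theorem blendAuxB_eq_flatMap (n : Nat) :
    ∀ (rest : List (List Char)), (∀ s ∈ rest, s ≠ []) → (∀ s ∈ rest, s.length ≤ n) →
      blendAuxB rest = (List.range n).flatMap (fun k => pvCol k rest) := by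
  induction n with
  | zero =>
    intro rest hne hlen
    cases rest with
    | nil => rw [blendAuxB.eq_def]; simp
    | cons a t =>
      have := hlen a (by simp)
      have := hne a (by simp)
      have : a = [] := by cases a <;> simp_all
      simp_all
  | succ m ih =>
    intro rest hne hlen
    cases hrest : rest.isEmpty with
    | true =>
      have : rest = [] := by simpa using hrest
      subst this
      rw [blendAuxB.eq_def]
      simp [pvCol]
    | false =>
      rw [blendAuxB.eq_def, hrest]
      simp only [Bool.false_eq_true, if_false]
      have hr : (List.range (m + 1)) = 0 :: (List.range m).map (· + 1) := by
        rw [List.range_succ_eq_map]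
      rw [hr]
      simp only [List.flatMap_cons, List.flatMap_map]
      rw [pvCol_zero rest hne]
      congr 1
      have hstep : ∀ k, pvCol (k + 1) rest
          = pvCol k ((rest.filter (fun s => 1 < s.length)).map (fun s => s.drop 1)) :=
        fun k => pvCol_succ k rest
      have := ih ((rest.filter (fun s => 1 < s.length)).map (fun s => s.drop 1))
        (by
          intro s hs
          simp only [List.mem_map, List.mem_filter] at hs
          obtain ⟨a, ⟨-, ha⟩, rfl⟩ := hs
          simp only [decide_eq_true_eq] at ha
          intro hcon
          have := congrArg List.length hcon
          simp at this
          omega)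
        (by
          intro s hs
          simp only [List.mem_map, List.mem_filter] at hs
          obtain ⟨a, ⟨haa, -⟩, rfl⟩ := hs
          have := hlen a haa
          simp
          omega)
      rw [this]
      exact (List.flatMap_congr (fun k _ => hstep k)).symm

-- the running max of Python's `max(len(seq) for seq in …)` equals the Nat-valued running max, cast to Int
theorem pvFoldlMaxCast (l : List String) (a : Nat) :
    (l.map (fun s => ((s.toList.length : Nat) : Int))).foldl max ((a : Int)) =
      (((l.map (fun s => s.toList.length)).foldl max a : Nat) : Int) := by
  induction l generalizing a with
  | nil => simp
  | cons s t ih =>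
    simp only [List.map_cons, List.foldl_cons]
    rw [← Nat.cast_max, ih]

-- A's inner loop over the sequences collects exactly column k
theorem pvInner (k : Nat) (l : List String) (acc : List Char) :
    l.foldl (fun acc seq =>
        if (0 : Int) + (k : Int) < PySem.Str.len seq then
          acc ++ [(PySem.Str.pyGet? seq ((0 : Int) + (k : Int))).getD ' '] else acc) acc
      = acc ++ pvCol k (l.map String.toList) := by
  induction l generalizing acc with
  | nil => simp [pvCol]
  | cons seq t ih =>
    simp only [List.foldl_cons, List.map_cons]
    by_cases h : k < seq.toList.length
    · have hc : seq.toList[k]? = some seq.toList[k] := List.getElem?_eq_getElem h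
      rw [if_pos (by rw [PySem.Str.len_eq]; omega)]
      have hget : PySem.Str.pyGet? seq ((0 : Int) + (k : Int)) = seq.toList[k]? := by
        simp
      rw [hget, hc]
      simp only [Option.getD_some]
      rw [ih]
      simp [pvCol, hc]
    · have hc : seq.toList[k]? = none := List.getElem?_eq_none (by omega)
      rw [if_neg (by rw [PySem.Str.len_eq]; omega)]
      rw [ih]
      simp [pvCol, hc]

-- A's outer loop over range(max_length) concatenates the columns
theorem pvOuter (l : List String) (n : Nat) : ∀ (acc : List Char),
    (List.range n).foldl (fun acc (k : Nat) =>
        l.foldl (fun acc seq =>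
          if (0 : Int) + (k : Int) < PySem.Str.len seq then
            acc ++ [(PySem.Str.pyGet? seq ((0 : Int) + (k : Int))).getD ' '] else acc) acc) acc
      = acc ++ (List.range n).flatMap (fun k => pvCol k (l.map String.toList)) := by
  induction n with
  | zero => simp
  | succ m ih =>
    intro acc
    rw [List.range_succ]
    simp only [List.foldl_append, List.foldl_cons, List.foldl_nil, List.flatMap_append,
      List.flatMap_cons, List.flatMap_nil]
    rw [ih, pvInner]
    simp [List.append_assoc]

-- ===== VERDICT (by name: the statement is the Claim_ definition above) =====
theorem blend_digits_spec : Claim_equal_blend_digits := by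
  intro ds _
  unfold Spec_blend_digits blend_digits blend_digits_alt
  by_cases hg : (ds.isEmpty || ds.any (fun seq => seq.toList.isEmpty)) = true
  · rw [if_pos hg, if_pos hg]
  · rw [if_neg hg, if_neg hg]
    have hg' := hg
    simp only [Bool.or_eq_true, not_or, List.isEmpty_iff, List.any_eq_true,
      not_exists, not_and] at hg'
    obtain ⟨hds, hall⟩ := hg'
    cases ds with
    | nil => exact absurd rfl hds
    | cons d tl =>
      -- the maximum length, as a natural number
      set M : Nat := (tl.map (fun s => s.toList.length)).foldl max d.toList.length with hMdef
      have hmax : PySem.List.max? ((d :: tl).map (fun seq => PySem.Str.len seq)) (fun x => x)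
          = some ((M : Int)) := by
        rw [List.map_cons, PySem.List.max?_id_cons]
        simp only [PySem.Str.len_eq]
        rw [pvFoldlMaxCast]
      rw [hmax]
      have hmono := PySem.List.le_foldl_max_nat tl (fun s => s.toList.length) (d.toList.length)
      have hbound : ∀ s ∈ (d :: tl).map String.toList, s.length ≤ M := by
        intro s hs
        rw [hMdef, List.foldl_map]
        simp only [List.mem_map, List.mem_cons] at hs
        obtain ⟨seq, hseq | hseq, rfl⟩ := hs
        · subst hseq
          exact hmono.1
        · exact hmono.2 _ hseq
      have hne : ∀ s ∈ (d :: tl).map String.toList, s ≠ [] := by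
        intro s hs
        simp only [List.mem_map] at hs
        obtain ⟨seq, hseq, rfl⟩ := hs
        simpa using hall seq hseq
      rw [blendAuxB_eq_flatMap M ((d :: tl).map String.toList) hne hbound]
      simp only [PySem.List.pyRange_one, Int.sub_zero, Int.toNat_natCast, List.foldl_map]
      rw [pvOuter]
      simp
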